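-- pv_equiv track=rewrite | github.com/doongidoong/PS_algo | python/programmers/토스03.py | solution
-- ===== SOURCE A (Python) =====
-- from collections import Counter
--
-- def solution(tasks):
--     answer=0
--     d = Counter(tasks)
--     for a,cnt in d.items():
--         if cnt ==1:
--             return -1
--         while cnt>=5:
--             cnt-=3
--             answer+=1
--         if cnt==4:
--             answer+=2
--         else:
--             answer+=1
--     return answer
-- ===== SOURCE B (Python) =====
-- from collections import Counter
--
-- def solution(tasks):
--     counts = Counter(tasks).values()
--     if any(c == 1 for c in counts):
--         return -1
--     return sum((c + 2) // 3 for c in counts)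
-- ===== Notes on version B (the rewrite author's own statement) =====
-- stated objective: simpler
-- what changed: Replaced the per-count subtract-3 while loop and 4-vs-rest branching with the closed form ceil(cnt/3) = (cnt+2)//3 summed over Counter values, with the -1 case as a single any() check instead of an early return inside the loop.
import Mathlib
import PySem

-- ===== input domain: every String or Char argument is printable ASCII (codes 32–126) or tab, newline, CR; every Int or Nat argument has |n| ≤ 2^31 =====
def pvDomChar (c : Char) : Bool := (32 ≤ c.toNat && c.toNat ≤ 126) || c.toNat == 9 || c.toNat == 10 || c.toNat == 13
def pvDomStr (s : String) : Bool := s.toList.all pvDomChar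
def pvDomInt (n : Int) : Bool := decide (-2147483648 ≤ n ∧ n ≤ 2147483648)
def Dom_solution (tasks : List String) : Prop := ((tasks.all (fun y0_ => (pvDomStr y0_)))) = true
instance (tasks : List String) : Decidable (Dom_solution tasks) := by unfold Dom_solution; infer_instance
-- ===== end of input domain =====

-- B replaces A's per-count subtract-3 while loop and 4-vs-rest branch by the
-- closed form (cnt+2)//3 summed over the Counter values (objective: simpler).

-- ===== PORT A =====
-- the inner 'while cnt>=5: cnt-=3; answer+=1' loop
def solLoopA (cnt answer : Int) : Int × Int :=
  if h : cnt ≥ 5 then solLoopA (cnt - 3) (answer + 1) else (cnt, answer)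
termination_by cnt.toNat
decreasing_by omega

-- the 'for a,cnt in d.items()' loop with its early 'return -1'
def solGoA : List (String × Int) → Int → Int
  | [], answer => answer
  | (_, cnt) :: rest, answer =>
      if cnt = 1 then -1
      else
        let p := solLoopA cnt answer
        if p.1 = 4 then solGoA rest (p.2 + 2) else solGoA rest (p.2 + 1)

def solution (tasks : List String) : Int :=
  solGoA (PySem.Dict.counter tasks).items 0

-- ===== PORT B =====
def solution_alt (tasks : List String) : Int :=
  let counts := (PySem.Dict.counter tasks).values
  if counts.any (fun c => c == 1) then -1
  else counts.foldl (fun s c => s + PySem.Int.floordiv (c + 2) 3) 0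

-- ===== PRECONDITION & SPEC =====
def Spec_solution (tasks : List String) (out : Int) : Prop := out = solution_alt tasks
instance (tasks : List String) (out : Int) : Decidable (Spec_solution tasks out) := by unfold Spec_solution; infer_instance

-- ===== CLAIM (what is proved, stated in full; the proofs are below) =====
def Claim_equal_solution : Prop := ∀ (tasks : List String), Dom_solution tasks → Spec_solution tasks (solution tasks)

-- ===== LEMMAS AND PROOFS =====

-- A's inner loop followed by the 4-vs-rest branch adds exactly (cnt+2)//3
lemma solLoopA_spec (cnt answer : Int) (h2 : 2 ≤ cnt) :
    (if (solLoopA cnt answer).1 = 4 then (solLoopA cnt answer).2 + 2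
     else (solLoopA cnt answer).2 + 1)
      = answer + PySem.Int.floordiv (cnt + 2) 3 := by
  induction cnt, answer using solLoopA.induct with
  | case1 cnt answer h ih =>
      rw [solLoopA, dif_pos h, ih (by omega)]
      have : PySem.Int.floordiv (cnt + 2) 3 = PySem.Int.floordiv (cnt - 3 + 2) 3 + 1 := by
        rw [PySem.Int.floordiv_eq_ediv_of_pos (by omega),
            PySem.Int.floordiv_eq_ediv_of_pos (by omega)]
        omega
      rw [this]; ring
  | case2 cnt answer h =>
      rw [solLoopA, dif_neg h]
      simp only
      interval_cases cnt <;> simp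

-- A's item loop equals B's any/sum form, for items whose counts are all ≥ 1
lemma solGoA_eq (l : List (String × Int)) (answer : Int)
    (hpos : ∀ p ∈ l, 1 ≤ p.2) :
    solGoA l answer =
      if (l.map (·.2)).any (fun c => c == 1) then -1
      else (l.map (·.2)).foldl (fun s c => s + PySem.Int.floordiv (c + 2) 3) answer := by
  induction l generalizing answer with
  | nil => simp [solGoA]
  | cons p rest ih =>
      obtain ⟨k, cnt⟩ := p
      by_cases h1 : cnt = 1
      · simp [solGoA, h1]
      · have hc : 1 ≤ cnt := hpos (k, cnt) (List.mem_cons_self ..)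
        have h2 : 2 ≤ cnt := by omega
        have hrest : ∀ q ∈ rest, 1 ≤ q.2 := fun q hq => hpos q (by simp [hq])
        simp only [solGoA, if_neg h1, List.map_cons, List.any_cons, List.foldl_cons]
        have hne : (cnt == 1) = false := by simp [h1]
        rw [hne]
        simp only [Bool.false_or]
        have hstep := solLoopA_spec cnt answer h2
        have hacc : (if (solLoopA cnt answer).1 = 4 then solGoA rest ((solLoopA cnt answer).2 + 2)
                     else solGoA rest ((solLoopA cnt answer).2 + 1))
            = solGoA rest (answer + PySem.Int.floordiv (cnt + 2) 3) := by
          rw [← hstep]; split_ifs <;> rfl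
        rw [hacc, ih _ hrest]

-- every count produced by Counter is at least 1
lemma counter_items_pos (tasks : List String) :
    ∀ p ∈ (PySem.Dict.counter tasks).items, (1 : Int) ≤ p.2 := by
  intro p hp
  rw [PySem.Dict.items_counter] at hp
  obtain ⟨k, hk, rfl⟩ := List.mem_map.mp hp
  have hmem : k ∈ tasks := (PySem.Set.mem_ofList ..).mp hk
  have : 0 < tasks.count k := List.count_pos_iff.mpr hmem
  show (1 : Int) ≤ (tasks.count k : Int)
  exact_mod_cast this

-- ===== VERDICT (by name: the statement is the Claim_ definition above) =====
theorem solution_spec : Claim_equal_solution := by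
  intro tasks _
  unfold Spec_solution solution solution_alt
  rw [solGoA_eq _ _ (counter_items_pos tasks)]
  rfl
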